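-- pv_equiv track=rewrite | github.com/Alex-v-p/mobicare-LLMGuidance | finetuning-experiments/source_mapping/matcher.py | _find_token_positions
-- ===== SOURCE A (Python) =====
-- def _find_token_positions(haystack: list[str], tokens: list[str]) -> list[int]:
--     if not haystack or not tokens:
--         return []
--     positions: set[int] = set()
--     candidate_tokens = [token for token in tokens if token]
--     for token in candidate_tokens[:10]:
--         try:
--             positions.add(haystack.index(token))
--         except ValueError:
--             continue
--     return sorted(positions)
-- ===== SOURCE B (Python) =====
-- def _find_token_positions(haystack: list[str], tokens: list[str]) -> list[int]:
--     if not haystack or not tokens: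
--         return []
--     # wanted = the capped candidate tokens, as a set
--     wanted = set([t for t in tokens if t][:10])
--     out: list[int] = []
--     # one pass over the haystack: the first time a wanted value appears, its
--     # index is recorded (in increasing order, so no sort is needed) and the
--     # value is retired; stop as soon as every wanted token has been seen.
--     for i, value in enumerate(haystack):
--         if not wanted:
--             break
--         if value in wanted:
--             out.append(i)
--             wanted.remove(value)
--     return out
-- ===== Notes on version B (the rewrite author's own statement) =====
-- stated objective: alternative
-- what changed: B inverts the traversal: instead of A's loop over the capped tokens with one haystack.index() scan per token followed by sorted(), B makes a single left-to-right pass over the haystack, recording an index the first time a still-wanted token's value appears and retiring that token (with early exit once all are found); the output is produced already in increasing order, so the sort disappears.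
import Mathlib
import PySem

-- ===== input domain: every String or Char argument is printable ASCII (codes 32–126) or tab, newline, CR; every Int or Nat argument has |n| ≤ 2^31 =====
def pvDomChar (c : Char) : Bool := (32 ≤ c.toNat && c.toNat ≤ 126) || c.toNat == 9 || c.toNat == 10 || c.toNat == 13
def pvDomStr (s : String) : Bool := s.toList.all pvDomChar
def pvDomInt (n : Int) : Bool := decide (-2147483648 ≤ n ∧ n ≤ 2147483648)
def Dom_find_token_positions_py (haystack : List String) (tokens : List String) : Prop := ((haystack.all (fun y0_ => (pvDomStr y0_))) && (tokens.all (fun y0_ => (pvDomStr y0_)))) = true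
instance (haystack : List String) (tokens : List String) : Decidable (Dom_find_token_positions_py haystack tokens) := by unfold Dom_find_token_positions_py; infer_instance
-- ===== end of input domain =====

-- B inverts the traversal: one pass over the haystack retiring wanted tokens as their
-- first occurrence is met (early exit), producing the indices already sorted — instead
-- of A's per-token haystack.index scans followed by sorted() (objective: alternative).

-- ===== PORT A =====
-- literal transliteration of _find_token_positions: per-token haystack.index with try/except
def find_token_positions_py (haystack : List String) (tokens : List String) : List Int :=
  if haystack = [] ∨ tokens = [] then []
  else
    let candidate_tokens := tokens.filter (fun t => t ≠ "")
    let positions : PySem.Set Int :=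
      (candidate_tokens.take 10).foldl (fun pos token =>
        match PySem.List.index? haystack token with
        | some k => PySem.Set.add pos (k : Int)
        | none => pos) PySem.Set.empty
    PySem.List.sorted positions (fun x => x) false

-- ===== PORT B =====
-- the haystack scan of Source B: 'for i, value in enumerate(haystack): if not wanted: break;
-- if value in wanted: out.append(i); wanted.remove(value)'
def pvScanB : List String → Int → PySem.Set String → List Int
  | [], _, _ => []
  | value :: rest, i, wanted =>
    if wanted = [] then []
    else if wanted.contains value then
      i :: pvScanB rest (i + 1) (PySem.Set.discard wanted value)
    else
      pvScanB rest (i + 1) wanted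

-- literal transliteration of Source B
def find_token_positions_py_alt (haystack : List String) (tokens : List String) : List Int :=
  if haystack = [] ∨ tokens = [] then []
  else
    let wanted : PySem.Set String := PySem.Set.ofList ((tokens.filter (fun t => t ≠ "")).take 10)
    pvScanB haystack 0 wanted

-- ===== PRECONDITION & SPEC =====
def Spec_find_token_positions_py (haystack : List String) (tokens : List String) (out : List Int) : Prop := out = find_token_positions_py_alt haystack tokens
instance (haystack : List String) (tokens : List String) (out : List Int) : Decidable (Spec_find_token_positions_py haystack tokens out) := by unfold Spec_find_token_positions_py; infer_instance

-- ===== CLAIM (what is proved, stated in full; the proofs are below) =====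
def Claim_equal_find_token_positions_py : Prop := ∀ (haystack : List String) (tokens : List String), Dom_find_token_positions_py haystack tokens → Spec_find_token_positions_py haystack tokens (find_token_positions_py haystack tokens)

-- ===== LEMMAS AND PROOFS =====

-- every index produced by the scan is ≥ the running counter
theorem pvScanB_lb (xs : List String) : ∀ (i : Int) (w : PySem.Set String),
    ∀ j ∈ pvScanB xs i w, i ≤ j := by
  induction xs with
  | nil => intro i w j hj; simp [pvScanB] at hj
  | cons x xs ih =>
    intro i w j hj
    simp only [pvScanB] at hj
    split at hj
    · simp at hj
    · split at hj
      · rcases List.mem_cons.mp hj with h | h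
        · omega
        · have := ih (i + 1) _ j h; omega
      · have := ih (i + 1) w j hj; omega

-- the scan's output is strictly increasing
theorem pvScanB_pairwise (xs : List String) : ∀ (i : Int) (w : PySem.Set String),
    (pvScanB xs i w).Pairwise (· < ·) := by
  induction xs with
  | nil => intro i w; simp [pvScanB]
  | cons x xs ih =>
    intro i w
    simp only [pvScanB]
    split
    · simp
    · split
      · exact List.pairwise_cons.mpr
          ⟨fun j hj => lt_of_lt_of_le (by omega) (pvScanB_lb xs (i + 1) _ j hj), ih (i + 1) _⟩
      · exact ih (i + 1) w

-- membership in the scan's output: exactly the offsets of first occurrences of wanted tokens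
theorem mem_pvScanB (xs : List String) : ∀ (i : Int) (w : PySem.Set String) (j : Int),
    j ∈ pvScanB xs i w ↔ ∃ t ∈ w, ∃ k, PySem.List.index? xs t = some k ∧ j = i + (k : Int) := by
  induction xs with
  | nil =>
    intro i w j
    simp [pvScanB, PySem.List.index?_eq_idxOf?, List.idxOf?]
  | cons x xs ih =>
    intro i w j
    simp only [pvScanB]
    split
    · rename_i hw
      subst hw; simp
    · split
      · rename_i hx
        have hxw : x ∈ w := by simpa using hx
        constructor
        · intro hj
          rcases List.mem_cons.mp hj with h | h
          · exact ⟨x, hxw, 0, PySem.List.index?_cons_self x xs, by omega⟩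
          · rcases (ih (i + 1) _ j).mp h with ⟨t, ht, k, hk, hjk⟩
            have htw := (PySem.Set.mem_discard w x t).mp ht
            refine ⟨t, htw.1, k + 1, ?_, by push_cast; omega⟩
            rw [PySem.List.index?_cons_of_ne xs (fun h => htw.2 h.symm), hk]; rfl
        · rintro ⟨t, ht, k, hk, hjk⟩
          by_cases htx : t = x
          · subst htx
            rw [PySem.List.index?_cons_self] at hk
            obtain rfl : k = 0 := by injection hk with h; omega
            exact List.mem_cons.mpr (Or.inl (by omega))
          · rw [PySem.List.index?_cons_of_ne xs (fun h => htx h.symm)] at hk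
            cases hkk : PySem.List.index? xs t with
            | none => rw [hkk] at hk; simp at hk
            | some k' =>
              rw [hkk] at hk
              obtain rfl : k = k' + 1 := by injection hk with h; simp at h; omega
              refine List.mem_cons.mpr (Or.inr ((ih (i + 1) _ j).mpr
                ⟨t, (PySem.Set.mem_discard w x t).mpr ⟨ht, htx⟩, k', hkk, by push_cast at hjk ⊢; omega⟩))
      · rename_i hx
        have hxw : x ∉ w := by simpa using hx
        rw [ih (i + 1) w j]
        constructor
        · rintro ⟨t, ht, k, hk, hjk⟩
          have htx : t ≠ x := fun h => hxw (h ▸ ht)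
          refine ⟨t, ht, k + 1, ?_, by push_cast; omega⟩
          rw [PySem.List.index?_cons_of_ne xs (fun h => htx h.symm), hk]; rfl
        · rintro ⟨t, ht, k, hk, hjk⟩
          have htx : t ≠ x := fun h => hxw (h ▸ ht)
          rw [PySem.List.index?_cons_of_ne xs (fun h => htx h.symm)] at hk
          cases hkk : PySem.List.index? xs t with
          | none => rw [hkk] at hk; simp at hk
          | some k' =>
            rw [hkk] at hk
            obtain rfl : k = k' + 1 := by injection hk with h; simp at h; omega
            exact ⟨t, ht, k', hkk, by push_cast at hjk ⊢; omega⟩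

-- membership in A's fold: the recorded first indices of the candidate tokens
theorem mem_foldA (hay : List String) (cand : List String) : ∀ (s : PySem.Set Int) (j : Int),
    (j ∈ cand.foldl (fun pos token =>
        match PySem.List.index? hay token with
        | some k => PySem.Set.add pos (k : Int)
        | none => pos) s)
      ↔ j ∈ s ∨ ∃ t ∈ cand, ∃ k, PySem.List.index? hay t = some k ∧ j = (k : Int) := by
  induction cand with
  | nil => intro s j; simp
  | cons c cand ih =>
    intro s j
    simp only [List.foldl_cons]
    cases hc : PySem.List.index? hay c with
    | none =>
      rw [ih]
      constructor
      · rintro (h | ⟨t, ht, k, hk, hjk⟩)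
        · exact Or.inl h
        · exact Or.inr ⟨t, List.mem_cons_of_mem c ht, k, hk, hjk⟩
      · rintro (h | ⟨t, ht, k, hk, hjk⟩)
        · exact Or.inl h
        · rcases List.mem_cons.mp ht with rfl | ht'
          · rw [hc] at hk; cases hk
          · exact Or.inr ⟨t, ht', k, hk, hjk⟩
    | some k0 =>
      rw [ih]
      constructor
      · rintro (h | ⟨t, ht, k, hk, hjk⟩)
        · rcases (PySem.Set.mem_add s (k0 : Int) j).mp h with h' | rfl
          · exact Or.inl h'
          · exact Or.inr ⟨c, List.mem_cons_self, k0, hc, rfl⟩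
        · exact Or.inr ⟨t, List.mem_cons_of_mem c ht, k, hk, hjk⟩
      · rintro (h | ⟨t, ht, k, hk, hjk⟩)
        · exact Or.inl ((PySem.Set.mem_add s (k0 : Int) j).mpr (Or.inl h))
        · rcases List.mem_cons.mp ht with rfl | ht'
          · rw [hc] at hk
            have hkk0 : k = k0 := by injection hk with h; omega
            exact Or.inl ((PySem.Set.mem_add s (k0 : Int) j).mpr (Or.inr (hkk0 ▸ hjk)))
          · exact Or.inr ⟨t, ht', k, hk, hjk⟩

-- A's fold builds a Set (nodup)
theorem nodup_foldA (hay : List String) (cand : List String) : ∀ (s : PySem.Set Int),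
    s.Nodup → (cand.foldl (fun pos token =>
        match PySem.List.index? hay token with
        | some k => PySem.Set.add pos (k : Int)
        | none => pos) s).Nodup := by
  induction cand with
  | nil => intro s hs; simpa using hs
  | cons c cand ih =>
    intro s hs
    simp only [List.foldl_cons]
    cases hc : PySem.List.index? hay c with
    | none => exact ih s hs
    | some k0 => exact ih _ (PySem.Set.nodup_add s (k0 : Int) hs)

theorem find_token_positions_py_eq (haystack tokens : List String) :
    find_token_positions_py haystack tokens = find_token_positions_py_alt haystack tokens := by
  unfold find_token_positions_py find_token_positions_py_alt
  split
  · rfl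
  · set cand := (tokens.filter (fun t => t ≠ "")).take 10 with hcand
    apply PySem.List.sorted_eq_of_perm_of_pairwise_lt
    · -- the scan output is a permutation of A's position set
      refine (List.perm_ext_iff_of_nodup
        ((pvScanB_pairwise haystack 0 _).imp ne_of_lt)
        (nodup_foldA haystack cand PySem.Set.empty List.nodup_nil)).mpr ?_
      intro j
      rw [mem_pvScanB, mem_foldA]
      constructor
      · rintro ⟨t, ht, k, hk, hjk⟩
        exact Or.inr ⟨t, (PySem.Set.mem_ofList cand t).mp ht, k, hk, by omega⟩
      · rintro (h | ⟨t, ht, k, hk, hjk⟩)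
        · simp [PySem.Set.empty] at h
        · exact ⟨t, (PySem.Set.mem_ofList cand t).mpr ht, k, hk, by omega⟩
    · exact pvScanB_pairwise haystack 0 _

-- ===== VERDICT (by name: the statement is the Claim_ definition above) =====
theorem find_token_positions_py_spec : Claim_equal_find_token_positions_py := by
  intro haystack tokens _
  unfold Spec_find_token_positions_py
  exact find_token_positions_py_eq haystack tokens
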